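-- pv_equiv track=rewrite | github.com/kvark/infermark | scripts/generate_chart.py | pick_platform
-- ===== SOURCE A (Python) =====
-- def pick_platform(data, override):
--     if override:
--         return override
--     for _model, rows in data:
--         for r in rows:
--             name = r.get("gpu_name")
--             if name and name.lower() != "cpu":
--                 return name
--     # All-CPU runs (or empty). Fall back to first gpu_name or "unknown".
--     for _model, rows in data:
--         for r in rows:
--             if r.get("gpu_name"):
--                 return r["gpu_name"]
--     return "unknown"
-- ===== SOURCE B (Python) =====
-- def pick_platform(data, override):
--     if override:
--         return override
--     fallback = None
--     for _model, rows in data: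
--         for r in rows:
--             name = r.get("gpu_name")
--             if name and name.lower() != "cpu":
--                 return name
--             if name and fallback is None:
--                 fallback = name
--     return fallback if fallback is not None else "unknown"
-- ===== Notes on version B (the rewrite author's own statement) =====
-- stated objective: simpler
-- what changed: Replaces A's two full passes over the data (first non-CPU name, then first truthy name) with a single pass that returns a non-CPU name immediately and carries the first truthy name as a fallback accumulator.
import Mathlib
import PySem

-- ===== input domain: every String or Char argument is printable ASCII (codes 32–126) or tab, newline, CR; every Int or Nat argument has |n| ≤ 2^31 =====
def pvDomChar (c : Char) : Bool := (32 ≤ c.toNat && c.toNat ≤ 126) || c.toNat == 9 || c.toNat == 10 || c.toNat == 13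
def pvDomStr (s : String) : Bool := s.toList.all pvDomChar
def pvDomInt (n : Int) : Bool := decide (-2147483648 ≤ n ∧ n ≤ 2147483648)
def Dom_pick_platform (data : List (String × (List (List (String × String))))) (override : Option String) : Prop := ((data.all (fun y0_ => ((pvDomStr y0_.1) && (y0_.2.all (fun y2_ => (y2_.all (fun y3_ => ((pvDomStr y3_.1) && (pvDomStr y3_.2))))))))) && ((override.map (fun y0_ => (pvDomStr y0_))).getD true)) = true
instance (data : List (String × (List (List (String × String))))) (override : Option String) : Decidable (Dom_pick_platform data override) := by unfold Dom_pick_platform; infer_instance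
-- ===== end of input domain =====

-- B replaces A's two full passes (first non-CPU name, then first truthy name) by one
-- pass carrying the first truthy name as a fallback accumulator (objective: simpler).

-- ===== PORT A =====
-- r.get("gpu_name"): first match in the association list
def pvAGet (r : List (String × String)) : Option String :=
  (r.find? (fun p => p.1 == "gpu_name")).map (·.2)

-- first pass over one rows list: first truthy name whose lowercase is not "cpu"
def pvAScan1Rows : List (List (String × String)) → Option String
  | [] => none
  | r :: rs =>
    match pvAGet r with
    | some n => if n ≠ "" ∧ PySem.Str.lower n ≠ "cpu" then some n else pvAScan1Rows rs
    | none => pvAScan1Rows rs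

def pvAScan1 : List (String × (List (List (String × String)))) → Option String
  | [] => none
  | (_, rows) :: rest =>
    match pvAScan1Rows rows with
    | some n => some n
    | none => pvAScan1 rest

-- second pass: first truthy name at all
def pvAScan2Rows : List (List (String × String)) → Option String
  | [] => none
  | r :: rs =>
    match pvAGet r with
    | some n => if n ≠ "" then some n else pvAScan2Rows rs
    | none => pvAScan2Rows rs

def pvAScan2 : List (String × (List (List (String × String)))) → Option String
  | [] => none
  | (_, rows) :: rest =>
    match pvAScan2Rows rows with
    | some n => some n
    | none => pvAScan2 rest

def pvABody (data : List (String × (List (List (String × String))))) : String :=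
  match pvAScan1 data with
  | some n => n
  | none =>
    match pvAScan2 data with
    | some n => n
    | none => "unknown"

def pick_platform (data : List (String × (List (List (String × String))))) (override : Option String) : String :=
  match override with
  | some s => if s ≠ "" then s else pvABody data
  | none => pvABody data

-- ===== PORT B =====
def pvBGet (r : List (String × String)) : Option String :=
  (r.find? (fun p => p.1 == "gpu_name")).map (·.2)

-- one rows list: either an early return (.inl) or the updated fallback (.inr)
def pvBRows : List (List (String × String)) → Option String → Sum String (Option String)
  | [], fb => .inr fb
  | r :: rs, fb =>
    match pvBGet r with
    | none => pvBRows rs fb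
    | some n =>
      if n ≠ "" ∧ PySem.Str.lower n ≠ "cpu" then .inl n
      else if n ≠ "" ∧ fb = none then pvBRows rs (some n)
      else pvBRows rs fb

def pvBGo : List (String × (List (List (String × String)))) → Option String → String
  | [], fb => fb.getD "unknown"
  | (_, rows) :: rest, fb =>
    match pvBRows rows fb with
    | .inl n => n
    | .inr fb' => pvBGo rest fb'

def pick_platform_alt (data : List (String × (List (List (String × String))))) (override : Option String) : String :=
  match override with
  | some s => if s ≠ "" then s else pvBGo data none
  | none => pvBGo data none

-- ===== PRECONDITION & SPEC =====
def Spec_pick_platform (data : List (String × (List (List (String × String))))) (override : Option String) (out : String) : Prop := out = pick_platform_alt data override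
instance (data : List (String × (List (List (String × String))))) (override : Option String) (out : String) : Decidable (Spec_pick_platform data override out) := by unfold Spec_pick_platform; infer_instance

-- ===== CLAIM (what is proved, stated in full; the proofs are below) =====
def Claim_equal_pick_platform : Prop := ∀ (data : List (String × (List (List (String × String))))) (override : Option String), Dom_pick_platform data override → Spec_pick_platform data override (pick_platform data override)

-- ===== LEMMAS AND PROOFS =====
theorem pvBRows_eq (rows : List (List (String × String))) (fb : Option String) :
    pvBRows rows fb =
      match pvAScan1Rows rows with
      | some n => .inl n
      | none => .inr (fb.or (pvAScan2Rows rows)) := by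
  induction rows generalizing fb with
  | nil => cases fb <;> rfl
  | cons r rs ih =>
    simp only [pvBRows, pvAScan1Rows, pvAScan2Rows, pvBGet, pvAGet]
    cases hg : (r.find? (fun p => p.1 == "gpu_name")).map (·.2) with
    | none => exact ih fb
    | some n =>
      by_cases h1 : n ≠ "" ∧ PySem.Str.lower n ≠ "cpu"
      · simp [h1]
      · simp only [h1, if_false]
        by_cases hn : n = ""
        · subst hn
          simp only [ne_eq, not_true_eq_false, false_and, if_false]
          exact ih fb
        · -- n truthy and lowercase "cpu"
          simp only [ne_eq, hn, not_false_eq_true, if_pos, true_and]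
          cases fb with
          | none =>
            rw [if_pos rfl, ih (some n)]
            cases h2 : pvAScan1Rows rs <;> simp [Option.or]
          | some f =>
            rw [if_neg (by simp), ih (some f)]
            cases h2 : pvAScan1Rows rs <;> simp [Option.or]

theorem pvBGo_eq (data : List (String × (List (List (String × String))))) (fb : Option String) :
    pvBGo data fb =
      match pvAScan1 data with
      | some n => n
      | none => (fb.or (pvAScan2 data)).getD "unknown" := by
  induction data generalizing fb with
  | nil => cases fb <;> rfl
  | cons p rest ih =>
    obtain ⟨m, rows⟩ := p
    simp only [pvBGo, pvAScan1, pvAScan2, pvBRows_eq]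
    cases h1 : pvAScan1Rows rows with
    | some n => rfl
    | none =>
      dsimp only
      rw [ih]
      cases h2 : pvAScan1 rest with
      | some n => rfl
      | none =>
        cases fb <;> cases h3 : pvAScan2Rows rows <;> simp [Option.or]

-- ===== VERDICT (by name: the statement is the Claim_ definition above) =====
theorem pick_platform_spec : Claim_equal_pick_platform := by
  intro data override _
  unfold Spec_pick_platform pick_platform pick_platform_alt
  have hbody : pvABody data = pvBGo data none := by
    rw [pvBGo_eq]
    unfold pvABody
    cases h1 : pvAScan1 data with
    | some n => rfl
    | none => cases h2 : pvAScan2 data <;> simp [Option.or]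
  cases override with
  | none => dsimp only; exact hbody
  | some s =>
    by_cases hs : s = "" <;> simp [hs, hbody]
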